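-- pv_equiv track=rewrite | github.com/Xuekai-Zhu/toedit | baselines/edu_classifier.py | shard_list
-- ===== SOURCE A (Python) =====
-- def shard_list(data_list, num_shards, shard_index):
--     if num_shards <= 0 or shard_index < 1 or shard_index > num_shards:
--         raise ValueError("Invalid number of shards or shard index.")
--
--     sorted_list = sorted(data_list)
--     shard_size = len(sorted_list) // num_shards
--     remainder = len(sorted_list) % num_shards
--
--     start_index = 0
--     shards = []
--
--     for i in range(num_shards):
--         end_index = start_index + shard_size + (1 if i < remainder else 0)
--         shards.append(sorted_list[start_index:end_index])
--         start_index = end_index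
--
--     return shards[shard_index-1]
-- ===== SOURCE B (Python) =====
-- def shard_list(data_list, num_shards, shard_index):
--     if num_shards <= 0 or shard_index < 1 or shard_index > num_shards:
--         raise ValueError("Invalid number of shards or shard index.")
--     n = len(data_list)
--     q = n // num_shards
--     r = n % num_shards
--     i = shard_index - 1
--     start = i * q + min(i, r)
--     end = start + q + (1 if i < r else 0)
--     return sorted(data_list)[start:end]
-- ===== Notes on version B (the rewrite author's own statement) =====
-- stated objective: faster
-- what changed: B computes the requested shard's start/end bounds in closed form (start = i*q + min(i,r)) and slices the sorted list once, instead of looping over all shards materialising every slice and then indexing.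
import Mathlib
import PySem

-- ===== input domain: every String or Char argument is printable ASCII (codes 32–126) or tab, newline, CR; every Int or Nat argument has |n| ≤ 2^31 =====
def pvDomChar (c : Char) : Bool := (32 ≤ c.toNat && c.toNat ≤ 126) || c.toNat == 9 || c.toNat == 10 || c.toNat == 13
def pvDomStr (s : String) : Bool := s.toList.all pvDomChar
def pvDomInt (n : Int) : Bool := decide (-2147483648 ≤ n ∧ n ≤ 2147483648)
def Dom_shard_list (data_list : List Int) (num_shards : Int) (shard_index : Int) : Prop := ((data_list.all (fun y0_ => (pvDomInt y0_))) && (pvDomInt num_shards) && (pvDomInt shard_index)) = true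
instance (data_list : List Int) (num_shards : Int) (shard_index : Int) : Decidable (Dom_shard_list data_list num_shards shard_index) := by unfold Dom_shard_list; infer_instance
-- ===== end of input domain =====

-- B replaces A's loop over all shards by a closed-form computation of the one requested
-- shard's slice bounds (simpler: no per-shard loop, only the returned slice is built).


-- ===== PORT A =====
def shard_list (data_list : List Int) (num_shards : Int) (shard_index : Int) : List Int :=
  let sorted_list := PySem.List.sorted data_list id false
  let shard_size := PySem.Int.floordiv (sorted_list.length : Int) num_shards
  let remainder := PySem.Int.mod (sorted_list.length : Int) num_shards
  let st := (PySem.List.pyRange 0 num_shards 1).foldl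
    (fun (st : Int × List (List Int)) i =>
      let end_index := st.1 + shard_size + (if i < remainder then 1 else 0)
      (end_index, st.2 ++ [PySem.List.slice sorted_list (some st.1) (some end_index)]))
    (0, ([] : List (List Int)))
  -- shards[shard_index-1]: in range whenever A returns (Pre_); IndexError otherwise
  (PySem.List.pyGet? st.2 (shard_index - 1)).getD []

-- ===== PORT B =====
def shard_list_alt (data_list : List Int) (num_shards : Int) (shard_index : Int) : List Int :=
  let n : Int := data_list.length
  let q := PySem.Int.floordiv n num_shards
  let r := PySem.Int.mod n num_shards
  let i := shard_index - 1
  let start := i * q + min i r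
  let e := start + q + (if i < r then 1 else 0)
  PySem.List.slice (PySem.List.sorted data_list id false) (some start) (some e)

-- ===== PRECONDITION & SPEC =====
-- A raises ValueError unless 0 < num_shards and 1 ≤ shard_index ≤ num_shards.
def Pre_shard_list (data_list : List Int) (num_shards : Int) (shard_index : Int) : Prop :=
  0 < num_shards ∧ 1 ≤ shard_index ∧ shard_index ≤ num_shards
instance (data_list : List Int) (num_shards : Int) (shard_index : Int) : Decidable (Pre_shard_list data_list num_shards shard_index) := by unfold Pre_shard_list; infer_instance

def pvWitness_shard_list : List Int × Int × Int := ([3, 1, 2, 5, 4], 2, 1)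

def Spec_shard_list (data_list : List Int) (num_shards : Int) (shard_index : Int) (out : List Int) : Prop := out = shard_list_alt data_list num_shards shard_index
instance (data_list : List Int) (num_shards : Int) (shard_index : Int) (out : List Int) : Decidable (Spec_shard_list data_list num_shards shard_index out) := by unfold Spec_shard_list; infer_instance

-- ===== CLAIM (what is proved, stated in full; the proofs are below) =====
def Claim_equal_shard_list : Prop := ∀ (data_list : List Int) (num_shards : Int) (shard_index : Int), Dom_shard_list data_list num_shards shard_index → Pre_shard_list data_list num_shards shard_index → Spec_shard_list data_list num_shards shard_index (shard_list data_list num_shards shard_index)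

-- ===== LEMMAS AND PROOFS =====

-- the start boundary of shard i (0-based) of a list of length n split into shards of size q with r leftovers
def pvBound (q r i : Int) : Int := i * q + min i r

theorem pvBound_succ (q r i : Int) : pvBound q r (i + 1) = pvBound q r i + q + (if i < r then 1 else 0) := by
  unfold pvBound
  have hm : (i + 1) * q = i * q + q := by ring
  rw [hm]; split_ifs with h <;> omega

theorem pv_loop (xs : List Int) (q r ns : Int) (k : Nat) : ∀ (a : Int) (acc : List (List Int)), a ≤ ns →
    ns - a = (k : Int) →
    (PySem.List.pyRange a ns 1).foldl
      (fun (st : Int × List (List Int)) i =>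
        (st.1 + q + (if i < r then 1 else 0),
         st.2 ++ [PySem.List.slice xs (some st.1) (some (st.1 + q + (if i < r then 1 else 0)))]))
      (pvBound q r a, acc)
    = (pvBound q r ns,
       acc ++ (PySem.List.pyRange a ns 1).map
         (fun i => PySem.List.slice xs (some (pvBound q r i)) (some (pvBound q r (i + 1))))) := by
  induction k with
  | zero =>
    intro a acc _ hk
    have hna : ns = a := by omega
    rw [PySem.List.pyRange_one_eq_nil (by omega)]
    simp [hna]
  | succ m ih =>
    intro a acc ha hk
    rw [PySem.List.pyRange_one_cons (by omega : a < ns)]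
    simp only [List.foldl_cons, List.map_cons]
    rw [← pvBound_succ]
    rw [ih (a + 1) (acc ++ [PySem.List.slice xs (some (pvBound q r a)) (some (pvBound q r (a + 1)))]) (by omega) (by omega)]
    simp [pvBound_succ]

-- ===== VERDICT (by name: the statement is the Claim_ definition above) =====
theorem shard_list_spec : Claim_equal_shard_list := by
  intro data ns si _hdom hpre
  obtain ⟨hns, hsi1, hsi2⟩ := hpre
  unfold Spec_shard_list shard_list shard_list_alt
  simp only [PySem.List.length_sorted]
  set xs := PySem.List.sorted data id false with hxs
  set q := PySem.Int.floordiv (data.length : Int) ns with hq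
  set r := PySem.Int.mod (data.length : Int) ns with hr
  have h0 : pvBound q r 0 = 0 := by
    have : 0 ≤ r := PySem.Int.mod_nonneg _ hns
    unfold pvBound; omega
  have hloop := pv_loop xs q r ns ns.toNat 0 [] (by omega) (by omega)
  rw [h0] at hloop
  rw [hloop]
  simp only [List.nil_append]
  -- index the mapped range at shard_index - 1
  obtain ⟨k, hk⟩ : ∃ k : Nat, si - 1 = (k : Int) := ⟨(si - 1).toNat, by omega⟩
  rw [hk]
  rw [PySem.List.pyGet?_natCast]
  have hns' : ((ns.toNat : Int)) = ns := by omega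
  rw [← hns']
  rw [PySem.List.getElem?_map_pyRange_zero _ ns.toNat k (by omega)]
  simp only [Option.getD_some]
  rw [pvBound_succ]
  unfold pvBound
  ring_nf
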